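-- pv_equiv track=rewrite | github.com/sidneycadot/qrcodes | binary_codes.py | version_information_code_remainder
-- ===== SOURCE A (Python) =====
-- def version_information_code_remainder(data: int) -> int:
--
--     residual = 0b000000000000
--     rmask_hi = 0b100000000000
--     rmask_lo = 0b011111111111
--     genpoly  = 0b111100100101
--
--     dmask = 0b100000
--
--     while dmask != 0:
--
--         databit = (data & dmask) != 0
--         dmask >>= 1
--
--         residual_bit = (residual & rmask_hi) != 0
--         residual = (residual & rmask_lo) << 1
--
--         if databit ^ residual_bit:
--             residual ^= genpoly
--
--     return residual
-- ===== SOURCE B (Python) =====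
-- def version_information_code_remainder(data: int) -> int:
--     # Textbook polynomial long division over the full 18-bit value:
--     # pad the 6 data bits with 12 zero check bits, then cancel leading terms
--     # with the 13-bit generator 0x1F25 until only the 12-bit remainder is left.
--     dividend = (data & 0x3F) << 12
--     for i in range(17, 11, -1):
--         if dividend & (1 << i):
--             dividend ^= 0x1F25 << (i - 12)
--     return dividend
-- ===== Notes on version B (the rewrite author's own statement) =====
-- stated objective: alternative
-- what changed: Replaced the bit-serial LFSR (shift a 12-bit residual register one data bit at a time) by textbook polynomial long division: build the full 18-bit dividend (data & 0x3F) << 12 and cancel each set leading bit with the aligned 13-bit generator 0x1F25, leaving the 12-bit remainder.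
import Mathlib
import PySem

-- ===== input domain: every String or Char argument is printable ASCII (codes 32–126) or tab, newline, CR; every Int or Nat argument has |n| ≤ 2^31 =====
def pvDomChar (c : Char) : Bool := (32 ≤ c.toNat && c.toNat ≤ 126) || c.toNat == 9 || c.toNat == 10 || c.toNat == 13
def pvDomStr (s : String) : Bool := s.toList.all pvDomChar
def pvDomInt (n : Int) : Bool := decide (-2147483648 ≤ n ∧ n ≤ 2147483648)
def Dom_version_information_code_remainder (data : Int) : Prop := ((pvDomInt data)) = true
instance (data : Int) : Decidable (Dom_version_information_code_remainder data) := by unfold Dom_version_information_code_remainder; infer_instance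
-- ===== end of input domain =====

-- B replaces A's bit-serial LFSR register (shift a 12-bit residual, feed one data bit per step)
-- by long division of the whole padded 18-bit dividend with the 13-bit generator 0x1F25
-- (objective: alternative decomposition, same cost).

-- ===== PORT A =====
-- 'while dmask != 0': ported as fuel recursion; fuel 7 ≥ the 6 iterations the loop
-- always runs (dmask starts at 0b100000 and halves to 0 in 6 steps), so it is exact.
def pvALoop (data : Int) : Nat → Int → Int → Int
  | 0, _, residual => residual
  | fuel + 1, dmask, residual =>
    if dmask ≠ 0 then
      let databit : Bool := PySem.Int.band data dmask ≠ 0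
      let dmask' := dmask >>> (1:Nat)
      let residualBit : Bool := PySem.Int.band residual 2048 ≠ 0
      let residual' := (PySem.Int.band residual 2047) <<< (1:Nat)
      pvALoop data fuel dmask' (if databit ^^ residualBit then PySem.Int.bxor residual' 3877 else residual')
    else residual

def version_information_code_remainder (data : Int) : Int :=
  pvALoop data 7 32 0

-- ===== PORT B =====
def version_information_code_remainder_alt (data : Int) : Int :=
  let dividend := (PySem.Int.band data 63) <<< (12:Nat)
  -- for i in range(17, 11, -1): if dividend & (1 << i): dividend ^= 0x1F25 << (i - 12)
  -- (i runs over 17,…,12, so '.toNat' on the shift amounts i and i-12 is exact)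
  (PySem.List.pyRange 17 11 (-1)).foldl
    (fun dv i =>
      if PySem.Int.band dv ((1 : Int) <<< i.toNat) ≠ 0 then
        PySem.Int.bxor dv ((7973 : Int) <<< (i - 12).toNat)
      else dv)
    dividend

-- ===== PRECONDITION & SPEC =====
def Spec_version_information_code_remainder (data : Int) (out : Int) : Prop := out = version_information_code_remainder_alt data
instance (data : Int) (out : Int) : Decidable (Spec_version_information_code_remainder data out) := by unfold Spec_version_information_code_remainder; infer_instance

-- ===== CLAIM (what is proved, stated in full; the proofs are below) =====
def Claim_equal_version_information_code_remainder : Prop := ∀ (data : Int), Dom_version_information_code_remainder data → Spec_version_information_code_remainder data (version_information_code_remainder data)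

-- ===== LEMMAS AND PROOFS =====

-- Nat facts about low-6-bit masks, by finite check / testBit extensionality.
theorem pvNat_band_sub : ∀ b < 64, ∀ m < 64, b - (b &&& m) = (63 - m) &&& b := by decide

theorem pvNat_band_mod (n b : Nat) (h : b < 64) : n % 64 &&& b = n &&& b := by
  apply Nat.eq_of_testBit_eq
  intro i
  have h64 : (64:Nat) = 2 ^ 6 := rfl
  rw [Nat.testBit_and, Nat.testBit_and, h64, Nat.testBit_mod_two_pow]
  by_cases hi : i < 6
  · simp [hi]
  · have hb : b < 2 ^ i := lt_of_lt_of_le h (by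
      calc (64:Nat) = 2^6 := rfl
      _ ≤ 2^i := Nat.pow_le_pow_right (by norm_num) (by omega))
    simp [Nat.testBit_lt_two_pow hb, hi]

-- masking with a constant below 64 only sees the argument modulo 64 (also for negatives)
theorem pvBand_emod64 (a b : Int) (hb0 : 0 ≤ b) (hb : b < 64) :
    PySem.Int.band a b = PySem.Int.band (a % 64) b := by
  obtain ⟨m, rfl⟩ := Int.eq_ofNat_of_zero_le hb0
  have hm : m < 64 := by exact_mod_cast hb
  cases a with
  | ofNat n =>
      have h1 : (Int.ofNat n) % 64 = ((n % 64 : Nat) : Int) := by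
        rw [Int.ofNat_eq_natCast]; push_cast; rfl
      rw [h1, Int.ofNat_eq_natCast, PySem.Int.band_natCast, PySem.Int.band_natCast,
        pvNat_band_mod n m hm]
  | negSucc k =>
      have hk64 : k % 64 < 64 := Nat.mod_lt k (by norm_num)
      have h1 : (Int.negSucc k) % 64 = ((63 - k % 64 : Nat) : Int) := by
        rw [Int.negSucc_eq]
        have h2 : (k : Int) % 64 = ((k % 64 : Nat) : Int) := by push_cast; rfl
        omega
      rw [h1, PySem.Int.band_natCast]
      have hL : PySem.Int.band (Int.negSucc k) ↑m = ((m - (m &&& k) : Nat) : Int) := by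
        simp only [PySem.Int.band]
        rw [if_neg (by omega), if_pos (by positivity)]
        norm_num
      rw [hL]
      congr 1
      rw [show m &&& k = m &&& (k % 64) from by
        rw [Nat.land_comm m k, Nat.land_comm m (k % 64)]
        exact (pvNat_band_mod k m hm).symm]
      exact pvNat_band_sub m hm (k % 64) hk64

theorem pvALoop_emod (data : Int) : ∀ (fuel : Nat) (dmask residual : Int), 0 ≤ dmask → dmask < 64 →
    pvALoop data fuel dmask residual = pvALoop (data % 64) fuel dmask residual := by
  intro fuel
  induction fuel with
  | zero => intro _ _ _ _; rfl
  | succ n ih =>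
      intro dmask residual h0 h1
      simp only [pvALoop]
      by_cases hd : dmask = 0
      · simp [hd]
      · rw [if_pos hd, if_pos hd, pvBand_emod64 data dmask h0 h1]
        have hs : dmask >>> (1:Nat) = dmask / 2 := by
          rw [Int.shiftRight_eq_div_pow]; norm_num
        exact ih _ _ (by omega) (by omega)

theorem pvA_emod (data : Int) :
    version_information_code_remainder data = version_information_code_remainder (data % 64) :=
  pvALoop_emod data 7 32 0 (by norm_num) (by norm_num)

theorem pvB_emod (data : Int) :
    version_information_code_remainder_alt data = version_information_code_remainder_alt (data % 64) := by
  unfold version_information_code_remainder_alt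
  rw [pvBand_emod64 data 63 (by norm_num) (by norm_num)]

-- the two programs agree on all 64 residues
theorem pvKey : ∀ n : Nat, n < 64 →
    version_information_code_remainder (↑n) = version_information_code_remainder_alt (↑n) := by
  decide

-- ===== VERDICT (by name: the statement is the Claim_ definition above) =====
theorem version_information_code_remainder_spec : Claim_equal_version_information_code_remainder := by
  intro data _
  unfold Spec_version_information_code_remainder
  rw [pvA_emod, pvB_emod]
  have h0 : 0 ≤ data % 64 := Int.emod_nonneg data (by norm_num)
  have h1 : data % 64 < 64 := Int.emod_lt_of_pos data (by norm_num)
  obtain ⟨n, hn⟩ := Int.eq_ofNat_of_zero_le h0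
  rw [hn]
  exact pvKey n (by exact_mod_cast hn ▸ h1)
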